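-- pv_equiv track=rewrite | github.com/ahmed4sy/TIA | libAF.py | warp_text
-- ===== SOURCE A (Python) =====
-- def rale(i=0, x:list=[]):
--     return range(i,len(x))
--
-- def warp_text(sons:list = []):
--     label:str = sons[0]
--     for k in rale(1,sons):
--         if len(sons[k]) >= 8:
--             label += f"\n{sons[k]}\n"
--         elif len(label.split(' '))%2 == 0:
--            label += f"\n{sons[k]}"
--         else:
--             label += f" {sons[k]}"
--     return label
-- ===== SOURCE B (Python) =====
-- def warp_text(sons: list = []):
--     # Single pass with a running space-parity counter: A re-splits the whole
--     # growing label on every short word (quadratic); B never splits.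
--     pieces = [sons[0]]
--     parity = sons[0].count(' ') % 2
--     for w in sons[1:]:
--         if len(w) >= 8:
--             pieces.append('\n' + w + '\n')
--         elif parity:
--             pieces.append('\n' + w)
--         else:
--             pieces.append(' ' + w)
--             parity += 1
--         parity = (parity + w.count(' ')) % 2
--     return ''.join(pieces)
-- ===== Notes on version B (the rewrite author's own statement) =====
-- stated objective: faster
-- what changed: B drops A's per-word re-split of the whole growing label and instead keeps a running space-count parity updated per appended word, collecting pieces and joining them once at the end.
import Mathlib
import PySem

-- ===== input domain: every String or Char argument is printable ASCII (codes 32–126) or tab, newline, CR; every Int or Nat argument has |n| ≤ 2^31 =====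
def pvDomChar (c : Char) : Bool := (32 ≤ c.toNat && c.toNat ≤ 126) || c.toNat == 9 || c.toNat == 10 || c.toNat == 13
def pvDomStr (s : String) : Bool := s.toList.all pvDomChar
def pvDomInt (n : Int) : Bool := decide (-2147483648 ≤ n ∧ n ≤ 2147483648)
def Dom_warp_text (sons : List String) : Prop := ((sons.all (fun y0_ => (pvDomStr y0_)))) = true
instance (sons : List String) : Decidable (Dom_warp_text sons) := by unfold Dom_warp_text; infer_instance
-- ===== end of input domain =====

-- B replaces A's per-iteration re-split of the whole growing label by a running
-- space-parity counter and a list of pieces joined once at the end (objective: faster).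

-- ===== PORT A =====
-- loop body of A: branch on len(w) and on parity of len(label.split(' '))
def wstepA (label : List Char) (w : String) : List Char :=
  let cs := w.toList
  if 8 ≤ cs.length then label ++ '\n' :: (cs ++ ['\n'])
  else if (PySem.Chars.splitOn label [' ']).length % 2 = 0 then label ++ '\n' :: cs
  else label ++ ' ' :: cs

-- label = sons[0]; for k in range(1, len(sons)): label += … (rale(1, sons) = range(1, len(sons)))
def warp_text (sons : List String) : String :=
  String.ofList ((PySem.List.pyRange 1 (sons.length : Int)).foldl
    (fun label k => wstepA label (PySem.List.pyGetD sons k "")) ((PySem.List.pyGetD sons 0 "").toList))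

-- ===== PORT B =====
-- loop body of B: append one piece, update the running space-parity counter
def wstepB (st : List (List Char) × Nat) (w : String) : List (List Char) × Nat :=
  let cs := w.toList
  let st' :=
    if 8 ≤ cs.length then (st.1 ++ ['\n' :: (cs ++ ['\n'])], st.2)
    else if st.2 ≠ 0 then (st.1 ++ ['\n' :: cs], st.2)
    else (st.1 ++ [' ' :: cs], st.2 + 1)
  (st'.1, (st'.2 + PySem.Chars.count cs [' ']) % 2)

-- pieces = [sons[0]]; parity = sons[0].count(' ') % 2; loop over sons[1:]; ''.join(pieces)
def warp_text_alt (sons : List String) : String :=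
  let first := (PySem.List.pyGetD sons 0 "").toList
  String.ofList (PySem.Chars.join []
    ((PySem.List.slice sons (some 1) none).foldl wstepB ([first], PySem.Chars.count first [' '] % 2)).1)

-- ===== PRECONDITION & SPEC =====
-- Pre_ excludes only the empty list, on which Python A raises IndexError at sons[0].
def Pre_warp_text (sons : List String) : Prop := sons ≠ []
instance (sons : List String) : Decidable (Pre_warp_text sons) := by unfold Pre_warp_text; infer_instance
def pvWitness_warp_text : List String := ["ab cd", "xy", "longword!"]

def Spec_warp_text (sons : List String) (out : String) : Prop := out = warp_text_alt sons
instance (sons : List String) (out : String) : Decidable (Spec_warp_text sons out) := by unfold Spec_warp_text; infer_instance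

-- ===== CLAIM (what is proved, stated in full; the proofs are below) =====
def Claim_equal_warp_text : Prop := ∀ (sons : List String), Dom_warp_text sons → Pre_warp_text sons → Spec_warp_text sons (warp_text sons)

-- ===== LEMMAS AND PROOFS =====

-- Chars.count with the single-char needle [' '] is List.count ' '
lemma countgo_space (l : List Char) : ∀ (fuel acc : Nat), l.length ≤ fuel →
    PySem.Chars.count.go [' '] fuel l acc = acc + l.count ' ' := by
  induction l with
  | nil => intro fuel acc _; cases fuel <;> simp [PySem.Chars.count.go]
  | cons c t ih =>
    intro fuel acc h
    cases fuel with
    | zero => simp at h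
    | succ n =>
      by_cases hc : c = ' '
      · subst hc
        simp [PySem.Chars.count.go, List.isPrefixOf, ih n (acc + 1) (by simpa using h)]
        omega
      · have hc' : ¬ (' ' = c) := fun hh => hc hh.symm
        simp [PySem.Chars.count.go, List.isPrefixOf, hc', hc, ih n acc (by simpa using h)]

lemma count_space (s : List Char) : PySem.Chars.count s [' '] = s.count ' ' := by
  simp [PySem.Chars.count, countgo_space s s.length 0 le_rfl]

-- len(label.split(' ')) = spaces + 1
lemma splitgo_space (l : List Char) : ∀ (fuel : Nat) (cur : List Char) (acc : List (List Char)),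
    l.length ≤ fuel →
    (PySem.Chars.splitOn.go [' '] fuel l cur acc).length = acc.length + 1 + l.count ' ' := by
  induction l with
  | nil => intro fuel cur acc _; cases fuel <;> simp [PySem.Chars.splitOn.go]
  | cons c t ih =>
    intro fuel cur acc h
    cases fuel with
    | zero => simp at h
    | succ n =>
      by_cases hc : c = ' '
      · subst hc
        simp [PySem.Chars.splitOn.go, List.isPrefixOf, ih n [] (cur.reverse :: acc) (by simpa using h)]
        omega
      · have hc' : ¬ (' ' = c) := fun hh => hc hh.symm
        simp [PySem.Chars.splitOn.go, List.isPrefixOf, hc', hc, ih n (c :: cur) acc (by simpa using h)]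

lemma splitOn_space_length (s : List Char) :
    (PySem.Chars.splitOn s [' ']).length = s.count ' ' + 1 := by
  simp [PySem.Chars.splitOn, splitgo_space s (s.length + 1) [] [] (by omega)]
  omega

lemma join_nil_flatten (xs : List (List Char)) : PySem.Chars.join [] xs = xs.flatten := by
  simp only [PySem.Chars.join, List.intercalate]
  induction xs with
  | nil => rfl
  | cons a t ih => cases t <;> simp_all [List.intersperse]

lemma loop_invariant (ws : List String) : ∀ (st : List (List Char) × Nat),
    st.2 = st.1.flatten.count ' ' % 2 →
    (ws.foldl wstepB st).1.flatten = ws.foldl wstepA st.1.flatten := by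
  induction ws with
  | nil => intro st _; rfl
  | cons w t ih =>
    intro st hst
    have hsplit : ((PySem.Chars.splitOn st.1.flatten [' ']).length % 2 = 0) ↔ (st.2 ≠ 0) := by
      rw [splitOn_space_length, hst]; omega
    simp only [List.foldl_cons]
    by_cases h8 : 8 ≤ w.length
    · rw [ih (wstepB st w) ?_]
      · simp [wstepA, wstepB, h8]
      · simp [wstepB, h8, count_space, List.count_append, hst]
    · by_cases hp : st.2 ≠ 0
      · have hp1 : st.1.flatten.count ' ' % 2 = 1 := by omega
        rw [ih (wstepB st w) ?_]
        · simp [wstepA, wstepB, h8, hp, hsplit.mpr hp]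
        · simp [wstepB, h8, hst, hp1, count_space, List.count_append]; omega
      · have hp0 : ¬ (st.1.flatten.count ' ' % 2 = 1) := by omega
        rw [ih (wstepB st w) ?_]
        · have hns : ¬ ((PySem.Chars.splitOn st.1.flatten [' ']).length % 2 = 0) := by
            intro hc; exact hp (hsplit.mp hc)
          simp [wstepA, wstepB, h8, hp, hns]
        · simp [wstepB, h8, hst, hp0, count_space, List.count_append]; omega

-- ===== VERDICT (by name: the statement is the Claim_ definition above) =====
theorem warp_text_spec : Claim_equal_warp_text := by
  intro sons _ hpre
  unfold Spec_warp_text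
  simp only [warp_text, warp_text_alt, PySem.List.slice_from_one]
  rw [PySem.List.foldl_pyRange_pyGetD' sons "" wstepA _ (by norm_num)]
  cases sons with
  | nil => exact absurd rfl hpre
  | cons s t =>
    have hfirst : (PySem.List.pyGetD (s :: t) 0 "") = s := by simp [pysem]
    rw [join_nil_flatten,
      loop_invariant _ _ (by simp [count_space])]
    simp [hfirst]
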